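-- pv_equiv track=rewrite | github.com/BangaWanga/midi_websocket_chesscam | Server/chesscam/image_processing.py | get_contour_child_num
-- ===== SOURCE A (Python) =====
-- from functools import partial
--
-- def get_contour_child_num(hierarchy_element, hierarchy):
--     if hierarchy_element[2] == -1:  # no child remaining
--         return 0
--     else:
--         # get all children siblings
--         children = []
--         current_child = hierarchy[hierarchy_element[2]]
--         children.append(current_child)
--
--         while current_child[0] > -1:
--             current_child = hierarchy[current_child[0]]
--             children.append(current_child)
--
--         # recurse over children
--         child_nums = list(map(partial(get_contour_child_num, hierarchy=hierarchy), children))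
--         return len(children) + sum(child_nums)
-- ===== SOURCE B (Python) =====
-- def get_contour_child_num(hierarchy_element, hierarchy):
--     # Iterative: explicit stack of nodes whose children are still to be counted.
--     count = 0
--     stack = [hierarchy_element]
--     while stack:
--         node = stack.pop()
--         if node[2] == -1:
--             continue
--         child = hierarchy[node[2]]
--         while True:
--             count += 1
--             stack.append(child)
--             if child[0] > -1:
--                 child = hierarchy[child[0]]
--             else:
--                 break
--     return count
-- ===== Notes on version B (the rewrite author's own statement) =====
-- stated objective: alternative
-- what changed: Replaces the recursion (which builds a sibling list per node and maps itself over it via functools.partial) with a single iterative loop over an explicit stack and a running counter; no child lists are materialised and no recursive calls are made.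
-- outside the precondition, e.g. on get_contour_child_num([0, 0, 0], [[-1, -1, -1], [1, -1, 1]]): A returns 1, B returns 1; on get_contour_child_num([0, 0, 0], [[-1, -1, -1], [5]]): A returns 1, B returns 1
import Mathlib
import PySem

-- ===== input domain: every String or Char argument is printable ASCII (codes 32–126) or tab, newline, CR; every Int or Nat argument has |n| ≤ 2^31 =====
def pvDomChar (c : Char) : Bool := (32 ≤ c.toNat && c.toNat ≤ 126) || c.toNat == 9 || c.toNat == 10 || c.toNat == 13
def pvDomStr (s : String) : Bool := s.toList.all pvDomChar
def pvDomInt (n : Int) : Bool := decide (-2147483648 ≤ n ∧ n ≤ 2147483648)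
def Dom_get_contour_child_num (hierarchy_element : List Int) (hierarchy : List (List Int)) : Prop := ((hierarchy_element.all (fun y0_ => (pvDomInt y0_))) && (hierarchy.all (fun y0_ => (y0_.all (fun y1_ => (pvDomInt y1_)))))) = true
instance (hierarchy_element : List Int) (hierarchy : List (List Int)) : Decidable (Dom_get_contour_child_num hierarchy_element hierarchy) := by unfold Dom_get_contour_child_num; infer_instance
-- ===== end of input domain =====

-- B replaces A's recursion-with-per-node-sibling-lists by one iterative loop over an
-- explicit stack and a running counter (return value only; neither version mutates its arguments).

-- ===== PORT A =====
-- the while loop of A: rows appended to `children` after the seed row (fuel makes it total;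
-- under Pre_ the fuel hierarchy.length is never exhausted)
def pvChildren (h : List (List Int)) : Nat → List Int → List (List Int)
  | 0, _ => []
  | f + 1, cur =>
    if PySem.List.pyGetD cur 0 0 > -1 then
      PySem.List.pyGetD h (PySem.List.pyGetD cur 0 0) [] ::
        pvChildren h f (PySem.List.pyGetD h (PySem.List.pyGetD cur 0 0) [])
    else []

-- A's recursion, fueled (the fuel hierarchy.length + 1 bounds the recursion depth under Pre_)
def pvA (h : List (List Int)) : Nat → List Int → Int
  | 0, _ => 0
  | f + 1, e =>
    if PySem.List.pyGetD e 2 0 = -1 then 0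
    else
      (((PySem.List.pyGetD h (PySem.List.pyGetD e 2 0) [] ::
          pvChildren h h.length (PySem.List.pyGetD h (PySem.List.pyGetD e 2 0) [])).length : Int) +
       ((PySem.List.pyGetD h (PySem.List.pyGetD e 2 0) [] ::
          pvChildren h h.length (PySem.List.pyGetD h (PySem.List.pyGetD e 2 0) [])).map
            (fun ch => pvA h f ch)).sum)

def get_contour_child_num (hierarchy_element : List Int) (hierarchy : List (List Int)) : Int :=
  pvA hierarchy (hierarchy.length + 1) hierarchy_element

-- ===== PORT B =====
-- B's inner while loop: count and push `cur`, then follow the next-sibling link while it is > -1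
def pvWalk (h : List (List Int)) : Nat → List Int → Int × List (List Int) → Int × List (List Int)
  | 0, _, cs => cs
  | f + 1, cur, (count, stack) =>
    if PySem.List.pyGetD cur 0 0 > -1 then
      pvWalk h f (PySem.List.pyGetD h (PySem.List.pyGetD cur 0 0) []) (count + 1, cur :: stack)
    else (count + 1, cur :: stack)

-- B's outer while loop: pop a node; skip it if it has no child, else walk its child chain
def pvBLoop (h : List (List Int)) : Nat → List (List Int) → Int → Int
  | 0, _, count => count
  | _ + 1, [], count => count
  | f + 1, node :: rest, count =>
    if PySem.List.pyGetD node 2 0 = -1 then pvBLoop h f rest count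
    else
      pvBLoop h f
        (pvWalk h h.length (PySem.List.pyGetD h (PySem.List.pyGetD node 2 0) []) (count, rest)).2
        (pvWalk h h.length (PySem.List.pyGetD h (PySem.List.pyGetD node 2 0) []) (count, rest)).1

def get_contour_child_num_alt (hierarchy_element : List Int) (hierarchy : List (List Int)) : Int :=
  pvBLoop hierarchy (2 ^ (hierarchy.length + 1)) [hierarchy_element] 0

-- ===== PRECONDITION & SPEC =====
-- helper definitions the precondition is phrased with
def pvEff (n : Nat) (p : Int) : Nat := if 0 ≤ p then p.toNat else (p + (n : Int)).toNat
def pvRow (h : List (List Int)) (k : Nat) : List Int := h.getD k []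
def pvL0 (r : List Int) : Int := PySem.List.pyGetD r 0 0
def pvL2 (r : List Int) : Int := PySem.List.pyGetD r 2 0
-- a child link: -1 (absent) or a Python index into the hierarchy (negative = from the end)
def pvCOk (n : Nat) (c : Int) : Prop := c = -1 ∨ (-(n : Int) ≤ c ∧ c < (n : Int))
-- link-graph successors of node k (sibling link if followed, child link if present)
def pvSuccs (h : List (List Int)) (k : Nat) : List Nat :=
  (if -1 < pvL0 (pvRow h k) then [pvEff h.length (pvL0 (pvRow h k))] else []) ++
  (if pvL2 (pvRow h k) ≠ -1 then [pvEff h.length (pvL2 (pvRow h k))] else [])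
-- length (up to the fuel) of the longest link-graph path starting at node k
def pvDepth (h : List (List Int)) : Nat → Nat → Nat
  | 0, _ => 0
  | m + 1, k => (pvSuccs h k).foldl (fun a j => max a (1 + pvDepth h m j)) 0
-- every row has length ≥ 3, a sibling link < length and a child link that is -1 or an index
def pvHOk (h : List (List Int)) : Prop :=
  ∀ i, i < h.length →
    3 ≤ (pvRow h i).length ∧ pvL0 (pvRow h i) < (h.length : Int) ∧ pvCOk h.length (pvL2 (pvRow h i))
-- the link graph is acyclic: the longest path from every node is shorter than the node count
def pvAc (h : List (List Int)) : Prop := ∀ k, k < h.length → pvDepth h h.length k < h.length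

-- Pre_ excludes inputs where A raises IndexError (a row or the element shorter than 3, or a
-- dereferenced link out of Python's index range) or loops forever (a cycle in the link graph);
-- for uniformity the row conditions are imposed on ALL rows once the element has a child, which
-- also excludes inputs whose only bad or cyclic rows are unreachable (there A returns and B
-- agrees — see the cited examples).
def Pre_get_contour_child_num (hierarchy_element : List Int) (hierarchy : List (List Int)) : Prop :=
  3 ≤ hierarchy_element.length ∧
  (PySem.List.pyGetD hierarchy_element 2 0 = -1 ∨
    (pvCOk hierarchy.length (PySem.List.pyGetD hierarchy_element 2 0) ∧
     pvHOk hierarchy ∧ pvAc hierarchy))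

instance (hierarchy_element : List Int) (hierarchy : List (List Int)) : Decidable (Pre_get_contour_child_num hierarchy_element hierarchy) := by
  unfold Pre_get_contour_child_num pvHOk pvAc pvCOk; infer_instance

def pvWitness_get_contour_child_num : List Int × List (List Int) :=
  ([0, 0, 1], [[-1, -1, -1], [0, -1, -1]])

def Spec_get_contour_child_num (hierarchy_element : List Int) (hierarchy : List (List Int)) (out : Int) : Prop := out = get_contour_child_num_alt hierarchy_element hierarchy
instance (hierarchy_element : List Int) (hierarchy : List (List Int)) (out : Int) : Decidable (Spec_get_contour_child_num hierarchy_element hierarchy out) := by unfold Spec_get_contour_child_num; infer_instance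

-- ===== CLAIM (what is proved, stated in full; the proofs are below) =====
def Claim_equal_get_contour_child_num : Prop := ∀ (hierarchy_element : List Int) (hierarchy : List (List Int)), Dom_get_contour_child_num hierarchy_element hierarchy → Pre_get_contour_child_num hierarchy_element hierarchy → Spec_get_contour_child_num hierarchy_element hierarchy (get_contour_child_num hierarchy_element hierarchy)

-- ===== LEMMAS AND PROOFS =====

-- rank of a node: its longest-path depth at fuel hierarchy.length
def pvR (h : List (List Int)) (k : Nat) : Nat := pvDepth h h.length k

-- generic foldl-max lemmas
theorem pvFold_le_pvFold (l : List Nat) (f g : Nat → Nat) :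
    ∀ (a b : Nat), a ≤ b → (∀ x ∈ l, f x ≤ g x) →
      l.foldl (fun acc x => max acc (f x)) a ≤ l.foldl (fun acc x => max acc (g x)) b := by
  induction l with
  | nil => intro a b hab _; simpa using hab
  | cons y l ih =>
    intro a b hab hfg
    simp only [List.foldl_cons]
    exact ih _ _ (max_le_max hab (hfg y List.mem_cons_self))
      (fun x hx => hfg x (List.mem_cons_of_mem _ hx))

theorem pvFold_init_le (l : List Nat) (f : Nat → Nat) (a : Nat) :
    a ≤ l.foldl (fun acc x => max acc (f x)) a := by
  induction l generalizing a with
  | nil => simp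
  | cons y l ih => exact le_trans (le_max_left a (f y)) (ih (max a (f y)))

theorem pvFold_mem_le (l : List Nat) (f : Nat → Nat) :
    ∀ (a x : Nat), x ∈ l → f x ≤ l.foldl (fun acc x => max acc (f x)) a := by
  induction l with
  | nil => intro a x hx; simp at hx
  | cons y l ih =>
    intro a x hx
    simp only [List.foldl_cons]
    rcases List.mem_cons.1 hx with rfl | hx'
    · exact le_trans (le_max_right a (f x)) (pvFold_init_le l f _)
    · exact ih _ x hx'

theorem pvFold_cases (l : List Nat) (f : Nat → Nat) (a : Nat) :
    l.foldl (fun acc x => max acc (f x)) a = a ∨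
      ∃ x ∈ l, l.foldl (fun acc x => max acc (f x)) a = f x := by
  induction l generalizing a with
  | nil => exact Or.inl rfl
  | cons y l ih =>
    simp only [List.foldl_cons]
    rcases ih (max a (f y)) with h | ⟨x, hx, hfx⟩
    · rcases max_choice a (f y) with hm | hm
      · exact Or.inl (by rw [h, hm])
      · exact Or.inr ⟨y, List.mem_cons_self, by rw [h, hm]⟩
    · exact Or.inr ⟨x, List.mem_cons_of_mem _ hx, hfx⟩

theorem pvDepth_succ_eq (h : List (List Int)) (m k : Nat) :
    pvDepth h (m + 1) k = (pvSuccs h k).foldl (fun a j => max a (1 + pvDepth h m j)) 0 := rfl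

-- depth is monotone in the fuel
theorem pvDepth_mono (h : List (List Int)) : ∀ m k, pvDepth h m k ≤ pvDepth h (m + 1) k := by
  intro m
  induction m with
  | zero => intro k; exact Nat.zero_le _
  | succ m ih =>
    intro k
    rw [pvDepth_succ_eq h m k, pvDepth_succ_eq h (m + 1) k]
    exact pvFold_le_pvFold (pvSuccs h k) (fun j => 1 + pvDepth h m j)
      (fun j => 1 + pvDepth h (m + 1) j) 0 0 le_rfl
      (fun j _ => show 1 + pvDepth h m j ≤ 1 + pvDepth h (m + 1) j by have := ih j; omega)

theorem pvDepth_succ_ge (h : List (List Int)) (m k j : Nat) (hj : j ∈ pvSuccs h k) :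
    1 + pvDepth h m j ≤ pvDepth h (m + 1) k := by
  rw [pvDepth_succ_eq h m k]
  exact pvFold_mem_le (pvSuccs h k) (fun j => 1 + pvDepth h m j) 0 j hj

theorem pvDepth_succ_cases (h : List (List Int)) (m k : Nat) :
    pvDepth h (m + 1) k = 0 ∨ ∃ j ∈ pvSuccs h k, pvDepth h (m + 1) k = 1 + pvDepth h m j := by
  rw [pvDepth_succ_eq h m k]
  exact pvFold_cases (pvSuccs h k) (fun j => 1 + pvDepth h m j) 0

-- if the depth still grows at fuel m, it already exceeds m
theorem pvDepth_growth (h : List (List Int)) :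
    ∀ m k, pvDepth h m k < pvDepth h (m + 1) k → m + 1 ≤ pvDepth h (m + 1) k := by
  intro m
  induction m with
  | zero => intro k hk; omega
  | succ m ih =>
    intro k hk
    rcases pvDepth_succ_cases h (m + 1) k with h0 | ⟨j, hj, hje⟩
    · omega
    · have h1 := pvDepth_succ_ge h m k j hj
      have h2 : pvDepth h m j < pvDepth h (m + 1) j := by omega
      have := ih j h2
      omega

theorem pvEff_lt (n : Nat) (p : Int) (h0 : -(n : Int) ≤ p) (h1 : p < (n : Int)) :
    pvEff n p < n := by
  unfold pvEff; split <;> omega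

theorem pvSuccs_lt (h : List (List Int)) (hr : pvHOk h) (k : Nat) (hk : k < h.length)
    (j : Nat) (hj : j ∈ pvSuccs h k) : j < h.length := by
  obtain ⟨h3, hs, hc⟩ := hr k hk
  unfold pvSuccs at hj
  rcases List.mem_append.1 hj with hj | hj
  · by_cases hcase : -1 < pvL0 (pvRow h k)
    · simp only [if_pos hcase, List.mem_singleton] at hj
      subst hj
      exact pvEff_lt _ _ (by omega) hs
    · simp [if_neg hcase] at hj
  · by_cases hcase : pvL2 (pvRow h k) ≠ -1
    · simp only [if_pos hcase, List.mem_singleton] at hj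
      subst hj
      rcases hc with hc' | ⟨hc1, hc2⟩
      · exact absurd hc' hcase
      · exact pvEff_lt _ _ hc1 hc2
    · simp [if_neg hcase] at hj

-- under acyclicity the depth stabilises at fuel hierarchy.length
theorem pvStab (h : List (List Int)) (hr : pvHOk h) (ha : pvAc h) :
    ∀ m, h.length ≤ m → ∀ k, k < h.length → pvDepth h m k = pvDepth h h.length k := by
  intro m hm
  induction m, hm using Nat.le_induction with
  | base => intro k _; rfl
  | succ m hm ih =>
    intro k hk
    by_cases heq : pvDepth h (m + 1) k = pvDepth h m k
    · rw [heq, ih k hk]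
    · exfalso
      have hmono := pvDepth_mono h m k
      have hlt : pvDepth h m k < pvDepth h (m + 1) k := by omega
      have hA := pvDepth_growth h m k hlt
      rcases pvDepth_succ_cases h m k with h0 | ⟨j, hj, hje⟩
      · omega
      · have hjn := pvSuccs_lt h hr k hk j hj
        rw [ih j hjn] at hje
        have := ha j hjn
        omega

-- the rank strictly decreases along every link-graph edge
theorem pvR_dec (h : List (List Int)) (hr : pvHOk h) (ha : pvAc h) (k : Nat)
    (hk : k < h.length) (j : Nat) (hj : j ∈ pvSuccs h k) : pvR h j < pvR h k := by
  have h1 := pvDepth_succ_ge h h.length k j hj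
  have h2 := pvStab h hr ha (h.length + 1) (by omega) k hk
  unfold pvR
  omega

theorem pvR_lt_len (h : List (List Int)) (ha : pvAc h) (k : Nat) (hk : k < h.length) :
    pvR h k < h.length := ha k hk

theorem pvSib_mem (h : List (List Int)) (k : Nat) (hs : -1 < pvL0 (pvRow h k)) :
    pvEff h.length (pvL0 (pvRow h k)) ∈ pvSuccs h k := by
  unfold pvSuccs
  exact List.mem_append.2 (Or.inl (by simp [if_pos hs]))

theorem pvChild_mem (h : List (List Int)) (k : Nat) (hc : pvL2 (pvRow h k) ≠ -1) :
    pvEff h.length (pvL2 (pvRow h k)) ∈ pvSuccs h k := by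
  unfold pvSuccs
  exact List.mem_append.2 (Or.inr (by simp [if_pos hc]))

theorem pvRow_getElem (h : List (List Int)) (k : Nat) (hk : k < h.length) :
    pvRow h k = h[k] := by
  rw [pvRow, List.getD_eq_getElem?_getD, List.getElem?_eq_getElem hk, Option.getD_some]

-- Python indexing (with negative wraparound) lands on pvRow (pvEff …)
theorem pvRowD_eq (h : List (List Int)) (p : Int) (h0 : -(h.length : Int) ≤ p)
    (h1 : p < (h.length : Int)) :
    PySem.List.pyGetD h p [] = pvRow h (pvEff h.length p) := by
  by_cases hp : 0 ≤ p
  · rw [PySem.List.pyGetD_eq_getElem h [] hp h1, pvEff, if_pos hp,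
      pvRow_getElem h p.toNat (by omega)]
  · have hk0 : 0 < (-p).toNat := by omega
    have hkn : (-p).toNat ≤ h.length := by omega
    have hpk : p = -(((-p).toNat : Nat) : Int) := by omega
    rw [hpk, PySem.List.pyGetD_neg_natCast h ((-p).toNat) ([] : List Int) hk0 hkn,
      pvEff, if_neg (by omega), pvRow_getElem h _ (by omega)]
    congr 1
    omega

theorem pvA_nonneg (h : List (List Int)) (f : Nat) (r : List Int) : 0 ≤ pvA h f r := by
  induction f generalizing r with
  | zero => simp [pvA]
  | succ f ih =>
    simp only [pvA]
    split
    · exact le_refl 0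
    · refine add_nonneg (by positivity) (List.sum_nonneg ?_)
      intro x hx
      obtain ⟨ch, _, rfl⟩ := List.mem_map.1 hx
      exact ih ch

theorem pvChildren_nil (h : List (List Int)) (k : Nat)
    (hs : ¬ -1 < pvL0 (pvRow h k)) (f : Nat) : pvChildren h f (pvRow h k) = [] := by
  cases f with
  | zero => rfl
  | succ f =>
    simp only [pvChildren]
    rw [if_neg (by rw [pvL0] at hs; exact hs)]

-- every element of the sibling chain from node k is a row of rank < pvR h k
theorem pvChildren_mem (h : List (List Int)) (hr : pvHOk h) (ha : pvAc h) :
    ∀ (f k : Nat), k < h.length → ∀ ch ∈ pvChildren h f (pvRow h k),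
      ∃ k', k' < h.length ∧ pvR h k' < pvR h k ∧ ch = pvRow h k' := by
  intro f
  induction f with
  | zero => intro k _ ch hch; simp [pvChildren] at hch
  | succ f ih =>
    intro k hk ch hch
    by_cases hs : -1 < pvL0 (pvRow h k)
    · have hs' : PySem.List.pyGetD (pvRow h k) 0 0 > -1 := by rw [pvL0] at hs; exact hs
      have hrw : PySem.List.pyGetD h (PySem.List.pyGetD (pvRow h k) 0 0) [] =
          pvRow h (pvEff h.length (pvL0 (pvRow h k))) := by
        rw [show PySem.List.pyGetD (pvRow h k) 0 0 = pvL0 (pvRow h k) from rfl]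
        exact pvRowD_eq h _ (by rw [pvL0] at hs ⊢; omega) (hr k hk).2.1
      simp only [pvChildren, if_pos hs', hrw] at hch
      have hKmem := pvSib_mem h k hs
      have hKn := pvSuccs_lt h hr k hk _ hKmem
      have hKR := pvR_dec h hr ha k hk _ hKmem
      rcases List.mem_cons.1 hch with rfl | htail
      · exact ⟨_, hKn, hKR, rfl⟩
      · obtain ⟨k', h1, h2, h3⟩ := ih _ hKn ch htail
        exact ⟨k', h1, by omega, h3⟩
    · rw [pvChildren_nil h k hs] at hch
      simp at hch

-- the chain does not depend on the fuel once the fuel is ≥ the node's rank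
theorem pvChildren_conv (h : List (List Int)) (hr : pvHOk h) (ha : pvAc h) :
    ∀ (m k f₁ f₂ : Nat), k < h.length → pvR h k ≤ m → pvR h k ≤ f₁ → pvR h k ≤ f₂ →
      pvChildren h f₁ (pvRow h k) = pvChildren h f₂ (pvRow h k) := by
  intro m
  induction m with
  | zero =>
    intro k f₁ f₂ hk hm _ _
    by_cases hs : -1 < pvL0 (pvRow h k)
    · have := pvR_dec h hr ha k hk _ (pvSib_mem h k hs)
      omega
    · rw [pvChildren_nil h k hs, pvChildren_nil h k hs]
  | succ m ih =>
    intro k f₁ f₂ hk hm hf₁ hf₂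
    by_cases hs : -1 < pvL0 (pvRow h k)
    · have hKmem := pvSib_mem h k hs
      have hKn := pvSuccs_lt h hr k hk _ hKmem
      have hKR := pvR_dec h hr ha k hk _ hKmem
      obtain ⟨g₁, rfl⟩ : ∃ g, f₁ = g + 1 := ⟨f₁ - 1, by omega⟩
      obtain ⟨g₂, rfl⟩ : ∃ g, f₂ = g + 1 := ⟨f₂ - 1, by omega⟩
      have hs' : PySem.List.pyGetD (pvRow h k) 0 0 > -1 := by rw [pvL0] at hs; exact hs
      have hrw : PySem.List.pyGetD h (PySem.List.pyGetD (pvRow h k) 0 0) [] =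
          pvRow h (pvEff h.length (pvL0 (pvRow h k))) := by
        rw [show PySem.List.pyGetD (pvRow h k) 0 0 = pvL0 (pvRow h k) from rfl]
        exact pvRowD_eq h _ (by rw [pvL0] at hs ⊢; omega) (hr k hk).2.1
      simp only [pvChildren, if_pos hs', hrw]
      rw [ih _ g₁ g₂ hKn (by omega) (by omega) (by omega)]
    · rw [pvChildren_nil h k hs, pvChildren_nil h k hs]

-- members of (row K :: chain K)
theorem pvC_mem (h : List (List Int)) (hr : pvHOk h) (ha : pvAc h) (K : Nat)
    (hK : K < h.length) :
    ∀ ch ∈ pvRow h K :: pvChildren h h.length (pvRow h K),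
      ∃ k', k' < h.length ∧ pvR h k' ≤ pvR h K ∧ ch = pvRow h k' := by
  intro ch hch
  rcases List.mem_cons.1 hch with rfl | htail
  · exact ⟨K, hK, le_rfl, rfl⟩
  · obtain ⟨k', h1, h2, h3⟩ := pvChildren_mem h hr ha _ K hK ch htail
    exact ⟨k', h1, by omega, h3⟩

-- facts about a node's child link, packaged
theorem pvChildLink (h : List (List Int)) (r : List Int)
    (hg : pvCOk h.length (pvL2 r)) (hc : ¬ pvL2 r = -1) :
    PySem.List.pyGetD h (PySem.List.pyGetD r 2 0) [] = pvRow h (pvEff h.length (pvL2 r)) ∧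
    pvEff h.length (pvL2 r) < h.length := by
  rcases hg with hg' | ⟨hg1, hg2⟩
  · exact absurd hg' hc
  · constructor
    · rw [show PySem.List.pyGetD r 2 0 = pvL2 r from rfl]
      exact pvRowD_eq h _ hg1 hg2
    · exact pvEff_lt _ _ hg1 hg2

-- pvA on a row does not depend on the fuel once the fuel exceeds the node's rank
theorem pvA_conv (h : List (List Int)) (hr : pvHOk h) (ha : pvAc h) :
    ∀ (m k f₁ f₂ : Nat), k < h.length → pvR h k ≤ m → pvR h k + 1 ≤ f₁ → pvR h k + 1 ≤ f₂ →
      pvA h f₁ (pvRow h k) = pvA h f₂ (pvRow h k) := by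
  intro m
  induction m with
  | zero =>
    intro k f₁ f₂ hk hm hf₁ hf₂
    obtain ⟨g₁, rfl⟩ : ∃ g, f₁ = g + 1 := ⟨f₁ - 1, by omega⟩
    obtain ⟨g₂, rfl⟩ : ∃ g, f₂ = g + 1 := ⟨f₂ - 1, by omega⟩
    by_cases hc : pvL2 (pvRow h k) = -1
    · rw [pvL2] at hc
      simp [pvA, hc]
    · have := pvR_dec h hr ha k hk _ (pvChild_mem h k hc)
      omega
  | succ m ih =>
    intro k f₁ f₂ hk hm hf₁ hf₂
    obtain ⟨g₁, rfl⟩ : ∃ g, f₁ = g + 1 := ⟨f₁ - 1, by omega⟩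
    obtain ⟨g₂, rfl⟩ : ∃ g, f₂ = g + 1 := ⟨f₂ - 1, by omega⟩
    by_cases hc : pvL2 (pvRow h k) = -1
    · rw [pvL2] at hc
      simp [pvA, hc]
    · have hc' : ¬ PySem.List.pyGetD (pvRow h k) 2 0 = -1 := by rw [pvL2] at hc; exact hc
      obtain ⟨hrw, hKn⟩ := pvChildLink h (pvRow h k) (hr k hk).2.2 hc
      have hKR := pvR_dec h hr ha k hk _ (pvChild_mem h k hc)
      simp only [pvA, if_neg hc', hrw]
      congr 1
      refine congrArg _ (List.map_congr_left ?_)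
      intro ch hch
      obtain ⟨k', h1, h2, rfl⟩ := pvC_mem h hr ha _ hKn ch hch
      exact ih k' g₁ g₂ h1 (by omega) (by omega) (by omega)

-- one unfolding of pvA at full fuel, for a node with a valid child link
theorem pvA_unfold (h : List (List Int)) (hr : pvHOk h) (ha : pvAc h) (r : List Int)
    (hg : pvCOk h.length (pvL2 r)) :
    pvA h (h.length + 1) r =
      if pvL2 r = -1 then 0
      else
        (((pvRow h (pvEff h.length (pvL2 r)) ::
            pvChildren h h.length (pvRow h (pvEff h.length (pvL2 r)))).length : Int) +
         ((pvRow h (pvEff h.length (pvL2 r)) ::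
            pvChildren h h.length (pvRow h (pvEff h.length (pvL2 r)))).map
              (fun ch => pvA h (h.length + 1) ch)).sum) := by
  by_cases hc : pvL2 r = -1
  · rw [if_pos hc]
    rw [pvL2] at hc
    simp [pvA, hc]
  · rw [if_neg hc]
    have hc' : ¬ PySem.List.pyGetD r 2 0 = -1 := by rw [pvL2] at hc; exact hc
    obtain ⟨hrw, hKn⟩ := pvChildLink h r hg hc
    simp only [pvA, if_neg hc', hrw]
    congr 1
    refine congrArg _ (List.map_congr_left ?_)
    intro ch hch
    obtain ⟨k', h1, h2, rfl⟩ := pvC_mem h hr ha _ hKn ch hch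
    have hk'r : pvR h k' < h.length := lt_of_le_of_lt h2 (pvR_lt_len h ha _ hKn)
    exact pvA_conv h hr ha (pvR h k') k' h.length (h.length + 1) h1 le_rfl (by omega) (by omega)

-- Σ over a list of (1 + f x) = length + Σ f
theorem pvSum_one_add (f : List Int → Int) (xs : List (List Int)) :
    (xs.map (fun x => 1 + f x)).sum = (xs.length : Int) + (xs.map (fun x => f x)).sum := by
  induction xs with
  | nil => simp
  | cons x xs ih => simp [ih]; ring

theorem pvPow_mono (a b : Nat) (hab : a ≤ b) : (2 : Int) ^ a ≤ (2 : Int) ^ b :=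
  pow_le_pow_right₀ (by norm_num) hab

-- the size bound that feeds B's fuel
theorem pvA_bound (h : List (List Int)) (hr : pvHOk h) (ha : pvAc h) :
    ∀ (m k : Nat), k < h.length → pvR h k ≤ m →
      (1 + pvA h (h.length + 1) (pvRow h k) ≤ (2 : Int) ^ (pvR h k + 1)) ∧
      (((pvRow h k :: pvChildren h h.length (pvRow h k)).map
          (fun ch => 1 + pvA h (h.length + 1) ch)).sum ≤ (2 : Int) ^ (pvR h k + 2) - 2) := by
  intro m
  induction m with
  | zero =>
    intro k hk hm
    have hcnil : pvL2 (pvRow h k) = -1 := by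
      by_contra hc
      have := pvR_dec h hr ha k hk _ (pvChild_mem h k hc)
      omega
    have hA0 : pvA h (h.length + 1) (pvRow h k) = 0 := by
      rw [pvA_unfold h hr ha _ (hr k hk).2.2, if_pos hcnil]
    have hsnil : ¬ -1 < pvL0 (pvRow h k) := by
      by_contra hs
      have := pvR_dec h hr ha k hk _ (pvSib_mem h k hs)
      omega
    have h2 : (2 : Int) ≤ 2 ^ (pvR h k + 1) := by
      have := pvPow_mono 1 (pvR h k + 1) (by omega); norm_num at this; omega
    have h4 : (4 : Int) ≤ 2 ^ (pvR h k + 2) := by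
      have := pvPow_mono 2 (pvR h k + 2) (by omega); norm_num at this; omega
    refine ⟨by omega, ?_⟩
    rw [pvChildren_nil h k hsnil]
    simp only [List.map_cons, List.map_nil, List.sum_cons, List.sum_nil, add_zero, hA0]
    omega
  | succ m ih =>
    intro k hk hm
    have hbnd : 1 + pvA h (h.length + 1) (pvRow h k) ≤ (2 : Int) ^ (pvR h k + 1) := by
      rw [pvA_unfold h hr ha _ (hr k hk).2.2]
      by_cases hc : pvL2 (pvRow h k) = -1
      · rw [if_pos hc]
        have := pvPow_mono 1 (pvR h k + 1) (by omega); norm_num at this; omega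
      · rw [if_neg hc]
        have hKmem := pvChild_mem h k hc
        have hKn := pvSuccs_lt h hr k hk _ hKmem
        have hKR := pvR_dec h hr ha k hk _ hKmem
        have hle : pvR h (pvEff h.length (pvL2 (pvRow h k))) ≤ m := by omega
        have hS := (ih _ hKn hle).2
        rw [pvSum_one_add] at hS
        have hpow := pvPow_mono (pvR h (pvEff h.length (pvL2 (pvRow h k))) + 2) (pvR h k + 1)
          (by omega)
        omega
    refine ⟨hbnd, ?_⟩
    by_cases hs : -1 < pvL0 (pvRow h k)
    · have hKmem := pvSib_mem h k hs
      have hKn := pvSuccs_lt h hr k hk _ hKmem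
      have hKR := pvR_dec h hr ha k hk _ hKmem
      obtain ⟨g, hg⟩ : ∃ g, h.length = g + 1 := ⟨h.length - 1, by omega⟩
      have hs' : PySem.List.pyGetD (pvRow h k) 0 0 > -1 := by rw [pvL0] at hs; exact hs
      have hrw : PySem.List.pyGetD h (PySem.List.pyGetD (pvRow h k) 0 0) [] =
          pvRow h (pvEff h.length (pvL0 (pvRow h k))) := by
        rw [show PySem.List.pyGetD (pvRow h k) 0 0 = pvL0 (pvRow h k) from rfl]
        exact pvRowD_eq h _ (by rw [pvL0] at hs ⊢; omega) (hr k hk).2.1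
      have hch : pvChildren h h.length (pvRow h k) =
          pvRow h (pvEff h.length (pvL0 (pvRow h k))) ::
            pvChildren h g (pvRow h (pvEff h.length (pvL0 (pvRow h k)))) := by
        conv_lhs => rw [hg]
        simp only [pvChildren, if_pos hs', hrw]
      have hconv : pvChildren h g (pvRow h (pvEff h.length (pvL0 (pvRow h k)))) =
          pvChildren h h.length (pvRow h (pvEff h.length (pvL0 (pvRow h k)))) :=
        pvChildren_conv h hr ha (pvR h (pvEff h.length (pvL0 (pvRow h k)))) _ g h.length hKn
          le_rfl (by have := pvR_lt_len h ha _ hKn; omega) (by have := pvR_lt_len h ha _ hKn; omega)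
      rw [hch, hconv]
      have hle : pvR h (pvEff h.length (pvL0 (pvRow h k))) ≤ m := by omega
      have hS' := (ih _ hKn hle).2
      simp only [List.map_cons, List.sum_cons] at hS' ⊢
      have hpow := pvPow_mono (pvR h (pvEff h.length (pvL0 (pvRow h k))) + 2) (pvR h k + 1)
        (by omega)
      have hsq : (2 : Int) ^ (pvR h k + 2) = 2 ^ (pvR h k + 1) + 2 ^ (pvR h k + 1) := by
        rw [pow_succ]; ring
      omega
    · rw [pvChildren_nil h k hs]
      simp only [List.map_cons, List.map_nil, List.sum_cons, List.sum_nil, add_zero]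
      have hsq : (2 : Int) ^ (pvR h k + 2) = 2 ^ (pvR h k + 1) + 2 ^ (pvR h k + 1) := by
        rw [pow_succ]; ring
      have h2 : (2 : Int) ≤ 2 ^ (pvR h k + 1) := by
        have := pvPow_mono 1 (pvR h k + 1) (by omega); norm_num at this; omega
      omega

theorem pvA_top_bound (h : List (List Int)) (hr : pvHOk h) (ha : pvAc h) (e : List Int)
    (hg : pvCOk h.length (pvL2 e)) :
    1 + pvA h (h.length + 1) e ≤ (2 : Int) ^ (h.length + 1) := by
  rw [pvA_unfold h hr ha e hg]
  by_cases hc : pvL2 e = -1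
  · rw [if_pos hc]
    have := pvPow_mono 1 (h.length + 1) (by omega); norm_num at this; omega
  · rw [if_neg hc]
    rcases hg with hg' | ⟨hg1, hg2⟩
    · exact absurd hg' hc
    · have hKn : pvEff h.length (pvL2 e) < h.length := pvEff_lt _ _ hg1 hg2
      have hS := (pvA_bound h hr ha (pvR h (pvEff h.length (pvL2 e))) _ hKn le_rfl).2
      rw [pvSum_one_add] at hS
      have hpow := pvPow_mono (pvR h (pvEff h.length (pvL2 e)) + 2) (h.length + 1)
        (by have := pvR_lt_len h ha _ hKn; omega)
      omega

-- B's inner loop counts and pushes exactly (row k :: chain k)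
theorem pvWalk_spec (h : List (List Int)) (hr : pvHOk h) (ha : pvAc h) :
    ∀ (m k f : Nat) (c : Int) (s : List (List Int)), k < h.length → pvR h k ≤ m →
      pvR h k + 1 ≤ f →
      pvWalk h f (pvRow h k) (c, s) =
        (c + ((pvRow h k :: pvChildren h h.length (pvRow h k)).length : Int),
         (pvRow h k :: pvChildren h h.length (pvRow h k)).reverse ++ s) := by
  intro m
  induction m with
  | zero =>
    intro k f c s hk hm hf
    obtain ⟨g, rfl⟩ : ∃ g, f = g + 1 := ⟨f - 1, by omega⟩
    have hsnil : ¬ -1 < pvL0 (pvRow h k) := by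
      by_contra hs
      have := pvR_dec h hr ha k hk _ (pvSib_mem h k hs)
      omega
    have hs' : ¬ PySem.List.pyGetD (pvRow h k) 0 0 > -1 := by rw [pvL0] at hsnil; exact hsnil
    rw [pvChildren_nil h k hsnil]
    simp [pvWalk, if_neg hs']
  | succ m ih =>
    intro k f c s hk hm hf
    obtain ⟨g, rfl⟩ : ∃ g, f = g + 1 := ⟨f - 1, by omega⟩
    by_cases hs : -1 < pvL0 (pvRow h k)
    · have hKmem := pvSib_mem h k hs
      have hKn := pvSuccs_lt h hr k hk _ hKmem
      have hKR := pvR_dec h hr ha k hk _ hKmem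
      have hs' : PySem.List.pyGetD (pvRow h k) 0 0 > -1 := by rw [pvL0] at hs; exact hs
      have hrw : PySem.List.pyGetD h (PySem.List.pyGetD (pvRow h k) 0 0) [] =
          pvRow h (pvEff h.length (pvL0 (pvRow h k))) := by
        rw [show PySem.List.pyGetD (pvRow h k) 0 0 = pvL0 (pvRow h k) from rfl]
        exact pvRowD_eq h _ (by rw [pvL0] at hs ⊢; omega) (hr k hk).2.1
      simp only [pvWalk, if_pos hs', hrw]
      have hle1 : pvR h (pvEff h.length (pvL0 (pvRow h k))) ≤ m := by omega
      have hle2 : pvR h (pvEff h.length (pvL0 (pvRow h k))) + 1 ≤ g := by omega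
      rw [ih _ g (c + 1) (pvRow h k :: s) hKn hle1 hle2]
      obtain ⟨g', hg'⟩ : ∃ g', h.length = g' + 1 := ⟨h.length - 1, by omega⟩
      have hch : pvChildren h h.length (pvRow h k) =
          pvRow h (pvEff h.length (pvL0 (pvRow h k))) ::
            pvChildren h g' (pvRow h (pvEff h.length (pvL0 (pvRow h k)))) := by
        conv_lhs => rw [hg']
        simp only [pvChildren, if_pos hs', hrw]
      have hconv : pvChildren h g' (pvRow h (pvEff h.length (pvL0 (pvRow h k)))) =
          pvChildren h h.length (pvRow h (pvEff h.length (pvL0 (pvRow h k)))) :=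
        pvChildren_conv h hr ha (pvR h (pvEff h.length (pvL0 (pvRow h k)))) _ g' h.length hKn
          le_rfl (by have := pvR_lt_len h ha _ hKn; omega) (by have := pvR_lt_len h ha _ hKn; omega)
      rw [hch, hconv]
      simp only [List.length_cons, List.reverse_cons, List.append_assoc, List.cons_append,
        List.nil_append, Prod.mk.injEq]
      refine ⟨by push_cast; ring, trivial⟩
    · have hs' : ¬ PySem.List.pyGetD (pvRow h k) 0 0 > -1 := by rw [pvL0] at hs; exact hs
      rw [pvChildren_nil h k hs]
      simp [pvWalk, if_neg hs']

-- B's outer loop invariant: with enough fuel it adds Σ pvA over the stack to the counter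
theorem pvBLoop_spec (h : List (List Int)) (hr : pvHOk h) (ha : pvAc h) :
    ∀ (f : Nat) (s : List (List Int)) (c : Int), (∀ r ∈ s, pvCOk h.length (pvL2 r)) →
      ((s.map (fun r => 1 + pvA h (h.length + 1) r)).sum ≤ (f : Int)) →
      pvBLoop h f s c = c + (s.map (fun r => pvA h (h.length + 1) r)).sum := by
  intro f
  induction f with
  | zero =>
    intro s c hgood hfuel
    cases s with
    | nil => simp [pvBLoop]
    | cons node rest =>
      exfalso
      rw [pvSum_one_add] at hfuel
      have := List.sum_nonneg (l := rest.map (fun r => pvA h (h.length + 1) r)) (by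
        intro x hx; obtain ⟨r, _, rfl⟩ := List.mem_map.1 hx; exact pvA_nonneg h _ r)
      have := pvA_nonneg h (h.length + 1) node
      simp only [List.map_cons, List.sum_cons, List.length_cons] at hfuel
      push_cast at hfuel
      omega
  | succ f ih =>
    intro s c hgood hfuel
    cases s with
    | nil => simp [pvBLoop]
    | cons node rest =>
      by_cases hc : PySem.List.pyGetD node 2 0 = -1
      · have hA0 : pvA h (h.length + 1) node = 0 := by simp [pvA, hc]
        simp only [pvBLoop, if_pos hc]
        have hfuel' : ((rest.map (fun r => 1 + pvA h (h.length + 1) r)).sum ≤ (f : Int)) := by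
          simp only [List.map_cons, List.sum_cons, hA0] at hfuel
          push_cast at hfuel ⊢
          omega
        rw [ih rest c (fun r hr' => hgood r (List.mem_cons_of_mem _ hr')) hfuel']
        simp [hA0]
      · have hg := hgood node List.mem_cons_self
        have hc2 : ¬ pvL2 node = -1 := by rw [pvL2]; exact hc
        obtain ⟨hrw, hKn⟩ := pvChildLink h node hg hc2
        simp only [pvBLoop, if_neg hc, hrw]
        have hw := pvWalk_spec h hr ha (pvR h (pvEff h.length (pvL2 node))) _ h.length c rest hKn
          le_rfl (by have := pvR_lt_len h ha _ hKn; omega)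
        rw [hw]
        have hAnode : pvA h (h.length + 1) node =
            (((pvRow h (pvEff h.length (pvL2 node)) ::
                pvChildren h h.length (pvRow h (pvEff h.length (pvL2 node)))).length : Int) +
             ((pvRow h (pvEff h.length (pvL2 node)) ::
                pvChildren h h.length (pvRow h (pvEff h.length (pvL2 node)))).map
                  (fun ch => pvA h (h.length + 1) ch)).sum) := by
          rw [pvA_unfold h hr ha node hg, if_neg hc2]
        have hCgood : ∀ ch ∈ pvRow h (pvEff h.length (pvL2 node)) ::
            pvChildren h h.length (pvRow h (pvEff h.length (pvL2 node))),
            pvCOk h.length (pvL2 ch) := by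
          intro ch hch
          obtain ⟨k', h1, _, rfl⟩ := pvC_mem h hr ha _ hKn ch hch
          exact (hr k' h1).2.2
        have hgood' : ∀ r ∈ (pvRow h (pvEff h.length (pvL2 node)) ::
            pvChildren h h.length (pvRow h (pvEff h.length (pvL2 node)))).reverse ++ rest,
            pvCOk h.length (pvL2 r) := by
          intro r hr'
          rcases List.mem_append.1 hr' with hr' | hr'
          · exact hCgood r (List.mem_reverse.1 hr')
          · exact hgood r (List.mem_cons_of_mem _ hr')
        have hsumC : (((pvRow h (pvEff h.length (pvL2 node)) ::
            pvChildren h h.length (pvRow h (pvEff h.length (pvL2 node)))).reverse).map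
              (fun r => pvA h (h.length + 1) r)).sum =
            ((pvRow h (pvEff h.length (pvL2 node)) ::
              pvChildren h h.length (pvRow h (pvEff h.length (pvL2 node)))).map
                (fun r => pvA h (h.length + 1) r)).sum := by
          rw [List.map_reverse, List.sum_reverse]
        have hfuel' : ((((pvRow h (pvEff h.length (pvL2 node)) ::
            pvChildren h h.length (pvRow h (pvEff h.length (pvL2 node)))).reverse ++ rest).map
              (fun r => 1 + pvA h (h.length + 1) r)).sum ≤ (f : Int)) := by
          have hsumC1 : (((pvRow h (pvEff h.length (pvL2 node)) ::
              pvChildren h h.length (pvRow h (pvEff h.length (pvL2 node)))).reverse).map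
                (fun r => 1 + pvA h (h.length + 1) r)).sum =
              ((pvRow h (pvEff h.length (pvL2 node)) ::
                pvChildren h h.length (pvRow h (pvEff h.length (pvL2 node)))).map
                  (fun r => 1 + pvA h (h.length + 1) r)).sum := by
            rw [List.map_reverse, List.sum_reverse]
          simp only [List.map_append, List.sum_append, hsumC1]
          rw [pvSum_one_add]
          simp only [List.map_cons, List.sum_cons]
          simp only [List.map_cons, List.sum_cons, hAnode] at hfuel
          push_cast at hfuel ⊢
          omega
        rw [ih _ _ hgood' hfuel']
        simp only [List.map_append, List.sum_append, List.map_cons, List.sum_cons, hAnode, hsumC]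
        ring

-- ===== VERDICT (by name: the statement is the Claim_ definition above) =====
theorem get_contour_child_num_spec : Claim_equal_get_contour_child_num := by
  intro e h _dom pre
  obtain ⟨_, pre2⟩ := pre
  unfold Spec_get_contour_child_num get_contour_child_num get_contour_child_num_alt
  rcases pre2 with hc | ⟨hg, hr, ha⟩
  · obtain ⟨g, hgeq⟩ : ∃ g, 2 ^ (h.length + 1) = g + 1 :=
      ⟨2 ^ (h.length + 1) - 1, by have := Nat.one_le_two_pow (n := h.length + 1); omega⟩
    rw [hgeq]
    simp only [pvBLoop, if_pos hc]
    cases g <;> simp [pvA, pvBLoop, hc]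
  · have hg' : pvCOk h.length (pvL2 e) := hg
    have hfuel : (([e].map (fun r => 1 + pvA h (h.length + 1) r)).sum ≤
        ((2 ^ (h.length + 1) : Nat) : Int)) := by
      simp only [List.map_cons, List.map_nil, List.sum_cons, List.sum_nil, add_zero]
      push_cast
      exact pvA_top_bound h hr ha e hg'
    rw [pvBLoop_spec h hr ha (2 ^ (h.length + 1)) [e] 0
      (by intro r hr'; rcases List.mem_singleton.1 hr' with rfl; exact hg') hfuel]
    simp
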